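-- pv_equiv track=rewrite | github.com/charlesjjhe/leetcode | classic290.py | god
-- ===== SOURCE A (Python) =====
-- from collections import OrderedDict
--
-- def god(s: str, pf: bool = False) -> OrderedDict:
--     od = OrderedDict()
--     if pf:
--         s = s.split(' ')
--     si = 0
--     while si < len(s):
--         t = s[si]
--         if t not in od.keys():
--             tl = [si]
--             od.update({t: tl})
--         else:
--             od.get(t).append(si)
--         si += 1
--     return od
-- ===== SOURCE B (Python) =====
-- from collections import OrderedDict
--
-- def god(s: str, pf: bool = False) -> OrderedDict:
--     # Recursive partition: peel off the first token's whole index group,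
--     # then recurse on the remaining pairs (those with a different token).
--     seq = s.split(' ') if pf else s
--
--     def go(pairs):
--         if not pairs:
--             return []
--         t = pairs[0][1]
--         mine = [i for i, x in pairs if x == t]
--         rest = [(i, x) for i, x in pairs if x != t]
--         return [(t, mine)] + go(rest)
--
--     return OrderedDict(go(list(enumerate(seq))))
-- ===== Notes on version B (the rewrite author's own statement) =====
-- stated objective: alternative
-- what changed: Replaces A's single incremental dict-building pass (membership test + insert/append per element) with a recursive partition: repeatedly take the first remaining token, collect all its indices in one scan, drop those pairs, and recurse on the rest; the resulting pair list is fed to OrderedDict once.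
import Mathlib
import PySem

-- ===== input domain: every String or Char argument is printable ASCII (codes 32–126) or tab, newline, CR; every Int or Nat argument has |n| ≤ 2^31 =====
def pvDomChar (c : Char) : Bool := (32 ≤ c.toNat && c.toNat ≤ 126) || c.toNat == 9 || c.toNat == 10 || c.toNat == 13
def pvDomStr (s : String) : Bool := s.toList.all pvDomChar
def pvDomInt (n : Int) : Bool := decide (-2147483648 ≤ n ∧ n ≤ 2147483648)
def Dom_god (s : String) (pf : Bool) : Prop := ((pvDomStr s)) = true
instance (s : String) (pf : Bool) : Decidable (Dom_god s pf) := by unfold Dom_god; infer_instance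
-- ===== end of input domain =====

-- B groups indices by token via a recursive partition (peel off the first
-- token's whole index group, recurse on the remaining pairs) instead of A's
-- single incremental dict-building loop; same result.

-- ===== PORT A =====
-- A's while loop over positions si, with t = s[si]: ported as a fold over the
-- enumerated token sequence (tokens are s.split(' ') when pf, else the 1-char
-- strings of s; ' ' is a nonempty separator so split? is always `some`).
def god (s : String) (pf : Bool) : List (String × List Int) :=
  let seq : List String :=
    if pf then (PySem.Str.split? s " ").getD [] else s.toList.map (fun c => String.ofList [c])
  ((PySem.List.enumerate seq 0).foldl
      (fun (od : PySem.Dict String (List Int)) p =>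
        if od.contains p.2 = false then od.insert p.2 [p.1]
        else od.modify p.2 [] (fun l => l ++ [p.1]))
      PySem.Dict.empty).items

-- ===== PORT B =====
-- B's recursive helper go(pairs): empty → []; otherwise take the first pair's
-- token t, keep (t, indices of all pairs carrying t), recurse on the pairs
-- whose token differs from t.
def godAltGo : List (Int × String) → List (String × List Int)
  | [] => []
  | (i, t) :: rest =>
    (t, (((i, t) :: rest).filter (fun p => p.2 == t)).map Prod.fst)
      :: godAltGo (((i, t) :: rest).filter (fun p => p.2 != t))
termination_by pairs => pairs.length
decreasing_by
  simp only [List.filter_cons, bne_self_eq_false, List.length_cons]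
  exact Nat.lt_succ_of_le (List.length_filter_le _ _)

def god_alt (s : String) (pf : Bool) : List (String × List Int) :=
  let seq : List String :=
    if pf then (PySem.Str.split? s " ").getD [] else s.toList.map (fun c => String.ofList [c])
  (PySem.Dict.ofList (godAltGo (PySem.List.enumerate seq 0))).items

-- ===== PRECONDITION & SPEC =====
def Spec_god (s : String) (pf : Bool) (out : List (String × List Int)) : Prop := out = god_alt s pf
instance (s : String) (pf : Bool) (out : List (String × List Int)) : Decidable (Spec_god s pf out) := by unfold Spec_god; infer_instance

-- ===== CLAIM (what is proved, stated in full; the proofs are below) =====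
def Claim_equal_god : Prop := ∀ (s : String) (pf : Bool), Dom_god s pf → Spec_god s pf (god s pf)

-- ===== LEMMAS AND PROOFS =====

-- ofList commutes with filter (dedup-by-first-occurrence keeps relative order).
lemma ofList_filter (l : List String) (p : String → Bool) :
    PySem.Set.ofList (l.filter p) = (PySem.Set.ofList l).filter p := by
  induction l with
  | nil => rfl
  | cons a l ih =>
    by_cases hpa : p a = true
    · simp only [List.filter_cons, hpa, if_pos, PySem.Set.ofList_cons, PySem.Set.discard, ih,
        List.filter_filter]
      congr 1
      apply List.filter_congr
      intro y _
      rw [Bool.and_comm]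
    · have hpa' : p a = false := by simpa using hpa
      have hfn : (fun y => p y && !(y == a)) = p := by
        funext y
        by_cases h : y = a
        · simp [h, hpa']
        · simp [h]
      simp only [List.filter_cons, hpa', PySem.Set.ofList_cons, PySem.Set.discard, ih,
        List.filter_filter, hfn, Bool.false_eq_true, ite_false]

-- canonical form of B's recursion: distinct tokens in order, each with its index list
lemma godAltGo_eq (pairs : List (Int × String)) :
    godAltGo pairs
      = (PySem.Set.ofList (pairs.map Prod.snd)).map (fun t =>
          (t, (pairs.filter (fun p => p.2 == t)).map Prod.fst)) := by
  induction pairs using godAltGo.induct with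
  | case1 => rw [godAltGo]; rfl
  | case2 i t rest ih =>
    have hhead : ((i, t) :: rest).filter (fun p => p.2 != t)
        = rest.filter (fun p => p.2 != t) := by simp
    rw [godAltGo]
    rw [List.map_cons, PySem.Set.ofList_cons, List.map_cons, ih]
    congr 1
    have hdisc : (PySem.Set.ofList (rest.map Prod.snd)).discard t
        = PySem.Set.ofList ((((i, t) :: rest).filter (fun p => p.2 != t)).map Prod.snd) := by
      show (PySem.Set.ofList (rest.map Prod.snd)).filter (fun y => !(y == t)) = _
      rw [← ofList_filter, List.filter_map, hhead]
      rfl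
    rw [← hdisc]
    apply List.map_congr_left
    intro t' ht'
    have hne : t' ≠ t := ((PySem.Set.mem_discard _ _ _).mp ht').2
    congr 1
    have h1 : ((i, t) :: rest).filter (fun p => p.2 == t')
        = rest.filter (fun p => p.2 == t') := by
      simp [hne.symm]
    have hconj : (fun (p : Int × String) => (p.2 == t') && (p.2 != t))
        = (fun p => p.2 == t') := by
      funext p
      by_cases h : p.2 = t'
      · simp [h, hne]
      · simp [h]
    have h2 : (((i, t) :: rest).filter (fun p => p.2 != t)).filter (fun p => p.2 == t')
        = rest.filter (fun p => p.2 == t') := by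
      rw [hhead, List.filter_filter, hconj]
    rw [h1, h2]

-- OrderedDict over godAltGo's pairs keeps them as-is (its keys are distinct).
lemma items_ofList_godAltGo (pairs : List (Int × String)) :
    (PySem.Dict.ofList (godAltGo pairs)).items = godAltGo pairs := by
  have hkeys : (godAltGo pairs).map Prod.fst
      = PySem.Set.ofList (pairs.map Prod.snd) := by
    rw [godAltGo_eq, List.map_map]
    exact List.map_id _
  have hnd : ((godAltGo pairs).map Prod.fst).Nodup := by
    rw [hkeys]; exact PySem.Set.nodup_ofList _
  show ((godAltGo pairs).foldl (fun acc p => acc.insert p.1 p.2) PySem.Dict.empty).items = _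
  rw [PySem.Dict.items_foldl_insert_fresh (godAltGo pairs) Prod.fst Prod.snd PySem.Dict.empty
      (fun a _ => by simp [PySem.Dict.contains_empty]) hnd]
  simp [show PySem.Dict.empty.items = ([] : List (String × List Int)) from rfl]

-- A's branching step is exactly `modify` (absent keys append with default []).
lemma god_step_eq_modify :
    (fun (od : PySem.Dict String (List Int)) (p : Int × String) =>
        if od.contains p.2 = false then od.insert p.2 [p.1]
        else od.modify p.2 [] (fun l => l ++ [p.1]))
    = (fun (od : PySem.Dict String (List Int)) (p : Int × String) =>
        od.modify p.2 [] (fun l => l ++ [p.1])) := by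
  funext od p
  by_cases h : od.contains p.2 = false
  · simp [h, PySem.Dict.modify, PySem.Dict.getD_of_not_contains od _ h]
  · simp [h]

-- The dict A builds over any enumerated sequence, described per key.
lemma god_dict_eq (seq : List String) :
    ((PySem.List.enumerate seq 0).foldl
        (fun (od : PySem.Dict String (List Int)) p =>
          od.modify p.2 [] (fun l => l ++ [p.1]))
        PySem.Dict.empty).items
    = (PySem.Set.ofList seq).map (fun t =>
        (t, ((PySem.List.enumerate seq 0).filter (fun p => p.2 == t)).map (fun p => p.1))) := by
  set L := PySem.List.enumerate seq 0 with hL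
  have hswap : L.foldl
      (fun (od : PySem.Dict String (List Int)) p => od.modify p.2 [] (fun l => l ++ [p.1]))
      PySem.Dict.empty
      = (L.map Prod.swap).foldl
      (fun (od : PySem.Dict String (List Int)) p => od.modify p.1 [] (fun l => l ++ [p.2]))
      PySem.Dict.empty := by
    rw [List.foldl_map]; rfl
  rw [hswap]
  have hkeys : ((L.map Prod.swap).foldl
      (fun (od : PySem.Dict String (List Int)) p => od.modify p.1 [] (fun l => l ++ [p.2]))
      PySem.Dict.empty).keys = PySem.Set.ofList seq := by
    rw [PySem.Dict.keys_foldl_modify_key (L.map Prod.swap) Prod.fst []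
        (fun _ p => (fun l => l ++ [p.2]))]
    have : (L.map Prod.swap).map Prod.fst = seq := by
      simp only [List.map_map]
      have : (Prod.fst ∘ Prod.swap : Int × String → String) = (fun p => p.2) := rfl
      rw [this, hL, PySem.List.map_snd_enumerate]
    rw [this]
    simp [PySem.Set.update, PySem.Set.ofList_eq_foldl, PySem.Dict.keys_empty]
  have hnodup : ((L.map Prod.swap).foldl
      (fun (od : PySem.Dict String (List Int)) p => od.modify p.1 [] (fun l => l ++ [p.2]))
      PySem.Dict.empty).keys.Nodup :=
    PySem.Dict.nodup_keys_foldl_modify_key (L.map Prod.swap) Prod.fst []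
      (fun _ p => (fun l => l ++ [p.2])) PySem.Dict.empty (by simp [PySem.Dict.keys_empty])
  rw [PySem.Dict.items_eq_map_keys _ hnodup [], hkeys]
  apply List.map_congr_left
  intro t _
  rw [PySem.Dict.getD_foldl_modify_append (L.map Prod.swap) PySem.Dict.empty t]
  simp only [PySem.Dict.getD_empty, List.nil_append, List.filter_map, List.map_map]
  rfl

-- ===== VERDICT (by name: the statement is the Claim_ definition above) =====
theorem god_spec : Claim_equal_god := by
  intro s pf _
  unfold Spec_god god god_alt
  rw [items_ofList_godAltGo, godAltGo_eq, god_step_eq_modify, god_dict_eq,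
    PySem.List.map_snd_enumerate]
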